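-- pv_equiv track=rewrite | github.com/l-Fingon-l/Teve-hack | dist/tevehack.py | MQw
-- ===== SOURCE A (Python) =====
-- def MQw(XQw: str):  # takes string returns integer (number of the character \ number in an array)
--     CQw = 0  # local integer
--     VQw = "ABCDEFGHIJKLMNOPQRSTUVWXYZ"  # local string
--     BQw = "abcdefghijklmnopqrstuvwxyz"  # local string
--     NQw = "0123456789"  # local string
--     while True:
--         if VQw[CQw: CQw + 1] == XQw:
--             return CQw
--         if BQw[CQw: CQw + 1] == XQw:
--             return CQw
--         CQw += 1
--         if CQw >= 26:
--             break
--     CQw = 0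
--     while True:
--         if NQw[CQw: CQw + 1] == XQw:
--             return CQw
--         CQw += 1
--         if CQw >= 10:
--             break
--     return 0
-- ===== SOURCE B (Python) =====
-- def MQw(XQw: str):  # index of a character in the alphabet / digits, computed arithmetically
--     if not (isinstance(XQw, str) and len(XQw) == 1):
--         return 0
--     c = ord(XQw)
--     if 65 <= c <= 90:
--         return c - 65
--     if 97 <= c <= 122:
--         return c - 97
--     if 48 <= c <= 57:
--         return c - 48
--     return 0
-- ===== Notes on version B (the rewrite author's own statement) =====
-- stated objective: simpler
-- what changed: B replaces A's two sequential 36-step slice-and-compare scan loops over alphabet/digit strings with a closed-form computation from the character code (ord arithmetic), with a guard returning 0 for non-single-character input.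
import Mathlib
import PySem

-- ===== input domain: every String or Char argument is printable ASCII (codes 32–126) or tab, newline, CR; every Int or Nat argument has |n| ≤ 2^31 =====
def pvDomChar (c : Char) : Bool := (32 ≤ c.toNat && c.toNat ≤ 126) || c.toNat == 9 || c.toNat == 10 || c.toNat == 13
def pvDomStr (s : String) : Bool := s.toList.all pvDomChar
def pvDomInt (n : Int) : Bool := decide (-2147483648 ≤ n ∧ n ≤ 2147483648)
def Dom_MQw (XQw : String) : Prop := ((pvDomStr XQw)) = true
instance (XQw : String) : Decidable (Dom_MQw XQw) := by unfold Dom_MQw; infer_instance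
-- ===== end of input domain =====

-- B replaces A's two slice-and-compare scan loops by closed-form arithmetic on the character code (objective: simpler).
-- ===== PORT A =====
-- second 'while True' loop of A: scan "0123456789"; the fuel argument (10 at the call,
-- never exhausted since the loop breaks at CQw + 1 ≥ 10) only makes the recursion structural
def MQwLoop2 (XQw : String) : Nat → Nat → Int
  | fuel + 1, CQw =>
    if PySem.Str.slice "0123456789" (some (CQw : Int)) (some ((CQw : Int) + 1)) == XQw then (CQw : Int)
    else if CQw + 1 ≥ 10 then 0
    else MQwLoop2 XQw fuel (CQw + 1)
  | 0, _ => 0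

-- first 'while True' loop of A: scan the upper- and lowercase alphabets (fuel 26, same remark)
def MQwLoop1 (XQw : String) : Nat → Nat → Int
  | fuel + 1, CQw =>
    if PySem.Str.slice "ABCDEFGHIJKLMNOPQRSTUVWXYZ" (some (CQw : Int)) (some ((CQw : Int) + 1)) == XQw then (CQw : Int)
    else if PySem.Str.slice "abcdefghijklmnopqrstuvwxyz" (some (CQw : Int)) (some ((CQw : Int) + 1)) == XQw then (CQw : Int)
    else if CQw + 1 ≥ 26 then MQwLoop2 XQw 10 0
    else MQwLoop1 XQw fuel (CQw + 1)
  | 0, _ => 0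

def MQw (XQw : String) : Int := MQwLoop1 XQw 26 0

-- ===== PORT B =====
def MQw_alt (XQw : String) : Int :=
  match XQw.toList with
  | [ch] =>
    let c : Int := (ch.toNat : Int)
    if 65 ≤ c ∧ c ≤ 90 then c - 65
    else if 97 ≤ c ∧ c ≤ 122 then c - 97
    else if 48 ≤ c ∧ c ≤ 57 then c - 48
    else 0
  | _ => 0

-- ===== PRECONDITION & SPEC =====
def Spec_MQw (XQw : String) (out : Int) : Prop := out = MQw_alt XQw
instance (XQw : String) (out : Int) : Decidable (Spec_MQw XQw out) := by unfold Spec_MQw; infer_instance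

-- ===== CLAIM (what is proved, stated in full; the proofs are below) =====
def Claim_equal_MQw : Prop := ∀ (XQw : String), Dom_MQw XQw → Spec_MQw XQw (MQw XQw)

-- ===== LEMMAS AND PROOFS =====

-- a length-1 slice of s equals XQw only if XQw has exactly one character
theorem slice_one_ne {s XQw : String} (c : Nat) (hc : c + 1 ≤ s.toList.length)
    (h : XQw.toList.length ≠ 1) :
    (PySem.Str.slice s (some (c : Int)) (some ((c : Int) + 1)) == XQw) = false := by
  apply beq_false_of_ne
  intro he
  apply h
  rw [← he]
  have hslice : (PySem.Str.slice s (some (c : Int)) (some ((c : Int) + 1))).toList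
      = (s.toList.drop c).take 1 := by
    have h1 : ((c : Int) + 1) = ((c + 1 : Nat) : Int) := by push_cast; ring
    rw [h1, PySem.Str.toList_slice, PySem.Chars.slice_eq_listSlice, PySem.List.slice_natCast]
    congr 1
    omega
  rw [hslice, List.length_take, List.length_drop]
  omega

theorem loop2_of_ne (XQw : String) (h : XQw.toList.length ≠ 1) :
    ∀ fuel c, fuel + c = 10 → MQwLoop2 XQw fuel c = 0 := by
  intro fuel
  induction fuel with
  | zero => intro c hc; rfl
  | succ n ih =>
    intro c hc
    have hlen : ("0123456789" : String).toList.length = 10 := by decide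
    rw [MQwLoop2, slice_one_ne c (by rw [hlen]; omega) h]
    simp only [Bool.false_eq_true, if_false]
    by_cases hb : c + 1 ≥ 10
    · rw [if_pos hb]
    · rw [if_neg hb]
      exact ih (c + 1) (by omega)

theorem loop1_of_ne (XQw : String) (h : XQw.toList.length ≠ 1) :
    ∀ fuel c, fuel + c = 26 → MQwLoop1 XQw fuel c = 0 := by
  intro fuel
  induction fuel with
  | zero => intro c hc; rfl
  | succ n ih =>
    intro c hc
    have hlenU : ("ABCDEFGHIJKLMNOPQRSTUVWXYZ" : String).toList.length = 26 := by decide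
    have hlenL : ("abcdefghijklmnopqrstuvwxyz" : String).toList.length = 26 := by decide
    rw [MQwLoop1, slice_one_ne c (by rw [hlenU]; omega) h, slice_one_ne c (by rw [hlenL]; omega) h]
    simp only [Bool.false_eq_true, if_false]
    by_cases hb : c + 1 ≥ 26
    · rw [if_pos hb]
      exact loop2_of_ne XQw h 10 0 rfl
    · rw [if_neg hb]
      exact ih (c + 1) (by omega)

-- the single-character case, checked for every code point in the ASCII domain
set_option maxRecDepth 100000 in
theorem single_char_check :
    ∀ k ∈ List.range 127, MQw (String.ofList [Char.ofNat k]) = MQw_alt (String.ofList [Char.ofNat k]) := by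
  decide

-- ===== VERDICT (by name: the statement is the Claim_ definition above) =====
theorem MQw_spec : Claim_equal_MQw := by
  intro XQw hdom
  unfold Spec_MQw
  match hx : XQw.toList with
  | [ch] =>
    have hch : pvDomChar ch = true := by
      have hd := hdom
      unfold Dom_MQw pvDomStr at hd
      rw [hx] at hd
      simpa using hd
    have hle : ch.toNat < 127 := by
      unfold pvDomChar at hch
      simp at hch
      omega
    have hXQw : XQw = String.ofList [ch] := by
      rw [← hx, String.ofList_toList]
    have hofNat : Char.ofNat ch.toNat = ch := Char.ofNat_toNat ch
    have hk := single_char_check ch.toNat (List.mem_range.mpr hle)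
    rw [hofNat] at hk
    rw [hXQw]
    exact hk
  | [] =>
    have h : XQw.toList.length ≠ 1 := by rw [hx]; simp
    rw [show MQw XQw = MQwLoop1 XQw 26 0 from rfl, loop1_of_ne XQw h 26 0 rfl]
    unfold MQw_alt
    rw [hx]
  | a :: b :: rest =>
    have h : XQw.toList.length ≠ 1 := by rw [hx]; simp
    rw [show MQw XQw = MQwLoop1 XQw 26 0 from rfl, loop1_of_ne XQw h 26 0 rfl]
    unfold MQw_alt
    rw [hx]
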